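-- pv_equiv track=rewrite | github.com/yujitomo/yujitomo.github.io | _site/assets/Python/text.py | func_this_command
-- ===== SOURCE A (Python) =====
-- special_characters = ["\\", "_", "{", "}", "[", "]", "*", " ", "\n", "^", "(", ")"]
--
-- def func_this_command(var_str):
--     num = 0
--     var_str += "*"
--     this_command = "" ### このバックスラッシュから始まるコマンドを所得
--     while ( var_str[num] not in special_characters ):
--         this_command += var_str[num]
--         num += 1
--     return this_command
-- ===== SOURCE B (Python) =====
-- import re
--
-- _PREFIX_RE = re.compile(r'[^\\_{}\[\]* \n^()]*')
--
-- def func_this_command(var_str):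
--     return _PREFIX_RE.match(var_str).group()
-- ===== Notes on version B (the rewrite author's own statement) =====
-- stated objective: idiomatic
-- what changed: Replaced the sentinel-append and manual index-accumulating while-loop with a single regex match of the leading run of non-special characters.
import Mathlib
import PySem

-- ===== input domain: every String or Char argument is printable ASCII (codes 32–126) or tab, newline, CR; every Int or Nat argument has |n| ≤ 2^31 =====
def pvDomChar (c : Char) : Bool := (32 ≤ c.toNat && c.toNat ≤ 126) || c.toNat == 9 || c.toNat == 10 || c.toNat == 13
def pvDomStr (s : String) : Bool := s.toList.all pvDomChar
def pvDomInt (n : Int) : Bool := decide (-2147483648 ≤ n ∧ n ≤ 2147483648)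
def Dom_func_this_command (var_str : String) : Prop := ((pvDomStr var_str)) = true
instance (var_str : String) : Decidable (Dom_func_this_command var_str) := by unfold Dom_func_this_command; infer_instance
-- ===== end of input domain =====

-- B replaces A's sentinel-append while-loop with a regex match of the leading run of
-- non-special characters (objective: idiomatic; same value on every input).
-- ===== PORT A =====
def pvSpecials : List Char := ['\\', '_', '{', '}', '[', ']', '*', ' ', '\n', '^', '(', ')']

-- the while-loop: consume chars until one is in special_characters (the appended '*' guarantees a stop)
def pvLoopA : List Char → List Char
  | [] => []
  | c :: rest => if c ∈ pvSpecials then [] else c :: pvLoopA rest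

def func_this_command (var_str : String) : String :=
  String.ofList (pvLoopA (var_str ++ "*").toList)

-- ===== PORT B =====
-- Source B matches r'[^\\_{}\[\]* \n^()]*' at the start: the regex semantics is the longest
-- leading run of characters outside the class, i.e. takeWhile on the complement.
def pvNotSpecial (c : Char) : Bool := !(c ∈ pvSpecials)

def func_this_command_alt (var_str : String) : String :=
  String.ofList (var_str.toList.takeWhile pvNotSpecial)


-- ===== PRECONDITION & SPEC =====
def Spec_func_this_command (var_str : String) (out : String) : Prop := out = func_this_command_alt var_str
instance (var_str : String) (out : String) : Decidable (Spec_func_this_command var_str out) := by unfold Spec_func_this_command; infer_instance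

-- ===== CLAIM (what is proved, stated in full; the proofs are below) =====
def Claim_equal_func_this_command : Prop := ∀ (var_str : String), Dom_func_this_command var_str → Spec_func_this_command var_str (func_this_command var_str)

-- ===== LEMMAS AND PROOFS =====
theorem pvLoopA_append_star (l : List Char) :
    pvLoopA (l ++ ['*']) = l.takeWhile pvNotSpecial := by
  induction l with
  | nil => decide
  | cons c rest ih =>
      simp only [List.cons_append, pvLoopA, List.takeWhile_cons, pvNotSpecial]
      by_cases h : c ∈ pvSpecials
      · simp [h]
      · simp [h, ih]

-- ===== VERDICT (by name: the statement is the Claim_ definition above) =====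
theorem func_this_command_spec : Claim_equal_func_this_command := by
  intro s _
  unfold Spec_func_this_command func_this_command func_this_command_alt
  have : (s ++ "*").toList = s.toList ++ ['*'] := by simp
  rw [this, pvLoopA_append_star]
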